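-- pv_equiv track=rewrite | github.com/blue-oil/blueoil | blueoil/cmd/init.py | dataset_format_choices
-- ===== SOURCE A (Python) =====
-- classification_dataset_formats = [
--     {
--         'name': 'Caltech101',
--         'desc': 'Caletch101 compatible',
--     },
--     {
--         'name': 'DeLTA-Mark for Classification',
--         'desc': 'Dataset for classification created by DeLTA-Mark',
--     },
-- ]
--
-- object_detection_dataset_formats = [
--     {
--         'name': 'OpenImagesV4',
--         'desc': 'OpenImagesV4 compatible',
--     },
--     {
--         'name': 'DeLTA-Mark for Object Detection',
--         'desc': 'Dataset for object detection created by DeLTA-Mark',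
--     },
-- ]
--
-- semantic_segmentation_dataset_formats = [
--     {
--         'name': 'CamvidCustom',
--         'desc': 'CamVid base cumstom format',
--     },
-- ]
--
-- keypoint_detection_dataset_formats = [
--     {
--         'name': 'Mscoco for Single-Person Pose Estimation',
--         'desc': 'Mscoco 2017 for Single-Person Pose Estimation',
--     },
-- ]
--
-- def dataset_format_choices(task_type):
--     if task_type == 'classification':
--         return [definition['name'] for definition in classification_dataset_formats]
--     elif task_type == 'object_detection':
--         return [definition['name'] for definition in object_detection_dataset_formats]
--     elif task_type == 'semantic_segmentation':
--         return [definition['name'] for definition in semantic_segmentation_dataset_formats]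
--     elif task_type == 'keypoint_detection':
--         return [definition['name'] for definition in keypoint_detection_dataset_formats]
-- ===== SOURCE B (Python) =====
-- classification_dataset_formats = [
--     {'name': 'Caltech101', 'desc': 'Caletch101 compatible'},
--     {'name': 'DeLTA-Mark for Classification',
--      'desc': 'Dataset for classification created by DeLTA-Mark'},
-- ]
--
-- object_detection_dataset_formats = [
--     {'name': 'OpenImagesV4', 'desc': 'OpenImagesV4 compatible'},
--     {'name': 'DeLTA-Mark for Object Detection',
--      'desc': 'Dataset for object detection created by DeLTA-Mark'},
-- ]
--
-- semantic_segmentation_dataset_formats = [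
--     {'name': 'CamvidCustom', 'desc': 'CamVid base cumstom format'},
-- ]
--
-- keypoint_detection_dataset_formats = [
--     {'name': 'Mscoco for Single-Person Pose Estimation',
--      'desc': 'Mscoco 2017 for Single-Person Pose Estimation'},
-- ]
--
-- # All formats flattened once into a single tagged (task_type, name) list; the function is
-- # one filtering pass over that flat list, with the empty result mapped back to None.
-- _tagged_names = [
--     (task, definition['name'])
--     for task, formats in [
--         ('classification', classification_dataset_formats),
--         ('object_detection', object_detection_dataset_formats),
--         ('semantic_segmentation', semantic_segmentation_dataset_formats),
--         ('keypoint_detection', keypoint_detection_dataset_formats),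
--     ]
--     for definition in formats
-- ]
--
-- def dataset_format_choices(task_type):
--     names = [name for task, name in _tagged_names if task == task_type]
--     return names or None
-- ===== Notes on version B (the rewrite author's own statement) =====
-- stated objective: alternative
-- what changed: Instead of A's four-way if/elif dispatch to per-list comprehensions, B flattens all format lists once into a single tagged (task_type, name) list and answers each call with one filtering pass over that flat list, mapping an empty result back to None; correct because every known task tag has a nonempty list, so the filter is empty exactly on unknown task types.
import Mathlib
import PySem

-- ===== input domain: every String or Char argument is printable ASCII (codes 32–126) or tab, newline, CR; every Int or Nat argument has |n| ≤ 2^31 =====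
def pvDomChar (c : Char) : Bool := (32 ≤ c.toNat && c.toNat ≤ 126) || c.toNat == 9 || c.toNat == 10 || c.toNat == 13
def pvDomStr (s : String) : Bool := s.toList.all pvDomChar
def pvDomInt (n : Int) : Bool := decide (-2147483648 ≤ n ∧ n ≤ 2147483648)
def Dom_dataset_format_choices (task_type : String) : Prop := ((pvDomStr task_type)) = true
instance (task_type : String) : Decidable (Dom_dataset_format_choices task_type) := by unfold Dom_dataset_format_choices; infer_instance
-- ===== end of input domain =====

-- B flattens the format lists once into a flat tagged (task, name) list and answers each
-- call with one filtering pass over it, empty result mapped to None (objective: alternative).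


-- ===== PORT A =====
def classification_dataset_formats : List (PySem.Dict String String) :=
  [PySem.Dict.mk [("name", "Caltech101"), ("desc", "Caletch101 compatible")],
   PySem.Dict.mk [("name", "DeLTA-Mark for Classification"),
                  ("desc", "Dataset for classification created by DeLTA-Mark")]]

def object_detection_dataset_formats : List (PySem.Dict String String) :=
  [PySem.Dict.mk [("name", "OpenImagesV4"), ("desc", "OpenImagesV4 compatible")],
   PySem.Dict.mk [("name", "DeLTA-Mark for Object Detection"),
                  ("desc", "Dataset for object detection created by DeLTA-Mark")]]

def semantic_segmentation_dataset_formats : List (PySem.Dict String String) :=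
  [PySem.Dict.mk [("name", "CamvidCustom"), ("desc", "CamVid base cumstom format")]]

def keypoint_detection_dataset_formats : List (PySem.Dict String String) :=
  [PySem.Dict.mk [("name", "Mscoco for Single-Person Pose Estimation"),
                  ("desc", "Mscoco 2017 for Single-Person Pose Estimation")]]

-- definition['name'] : every dict literal above carries the key "name", so get? is always
-- some; .getD "" only discharges the Option and is exact here.
def dataset_format_choices (task_type : String) : Option (List String) :=
  if task_type == "classification" then
    some (classification_dataset_formats.map (fun d => (PySem.Dict.get? d "name").getD ""))
  else if task_type == "object_detection" then
    some (object_detection_dataset_formats.map (fun d => (PySem.Dict.get? d "name").getD ""))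
  else if task_type == "semantic_segmentation" then
    some (semantic_segmentation_dataset_formats.map (fun d => (PySem.Dict.get? d "name").getD ""))
  else if task_type == "keypoint_detection" then
    some (keypoint_detection_dataset_formats.map (fun d => (PySem.Dict.get? d "name").getD ""))
  else none

-- ===== PORT B =====
-- Source B's module-level flat tagged list: (task_type, name) for every format of every task
def tagged_names : List (String × String) :=
  ([("classification", classification_dataset_formats),
    ("object_detection", object_detection_dataset_formats),
    ("semantic_segmentation", semantic_segmentation_dataset_formats),
    ("keypoint_detection", keypoint_detection_dataset_formats)]).flatMap
      (fun p => p.2.map (fun d => (p.1, (PySem.Dict.get? d "name").getD "")))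

-- one filtering pass; `names or None` = empty list mapped to none
def dataset_format_choices_alt (task_type : String) : Option (List String) :=
  let names := (tagged_names.filter (fun p => p.1 == task_type)).map Prod.snd
  if names = [] then none else some names

-- ===== PRECONDITION & SPEC =====
def Spec_dataset_format_choices (task_type : String) (out : Option (List String)) : Prop := out = dataset_format_choices_alt task_type
instance (task_type : String) (out : Option (List String)) : Decidable (Spec_dataset_format_choices task_type out) := by unfold Spec_dataset_format_choices; infer_instance

-- ===== CLAIM (what is proved, stated in full; the proofs are below) =====
def Claim_equal_dataset_format_choices : Prop := ∀ (task_type : String), Dom_dataset_format_choices task_type → Spec_dataset_format_choices task_type (dataset_format_choices task_type)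

-- ===== LEMMAS AND PROOFS =====

-- ===== VERDICT (by name: the statement is the Claim_ definition above) =====
theorem dataset_format_choices_spec : Claim_equal_dataset_format_choices := by
  intro t _
  unfold Spec_dataset_format_choices dataset_format_choices dataset_format_choices_alt
  by_cases h1 : t = "classification"
  · subst h1; decide
  · by_cases h2 : t = "object_detection"
    · subst h2; decide
    · by_cases h3 : t = "semantic_segmentation"
      · subst h3; decide
      · by_cases h4 : t = "keypoint_detection"
        · subst h4; decide
        · simp [tagged_names, classification_dataset_formats, object_detection_dataset_formats,
                semantic_segmentation_dataset_formats, keypoint_detection_dataset_formats,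
                h1, h2, h3, h4, Ne.symm h1, Ne.symm h2, Ne.symm h3, Ne.symm h4]
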